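-- pv_equiv track=rewrite | github.com/gordodev/shaw-fixrec-demo | tools/secmaster_generator.py | generate_symbols
-- ===== SOURCE A (Python) =====
-- from typing import List, Dict, Tuple, Optional
--
-- def generate_symbols(count: int) -> List[str]:
--     """Generate a list of unique stock symbols."""
--     symbols = []
--     chars = "ABCDEFGHIJKLMNOPQRSTUVWXYZ"
--
--     # Start with single letter symbols
--     for c in chars:
--         symbols.append(c)
--
--     # Add two letter symbols
--     for c1 in chars:
--         for c2 in chars:
--             symbols.append(c1 + c2)
--
--     # Add three letter symbols if needed
--     if count > len(symbols):
--         for c1 in chars: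
--             for c2 in chars:
--                 for c3 in chars[:10]:  # Limit to first 10 letters for third position
--                     symbols.append(c1 + c2 + c3)
--                     if len(symbols) >= count:
--                         return symbols[:count]
--
--     return symbols[:count]
-- ===== SOURCE B (Python) =====
-- def generate_symbols(count):
--     """Generate the first `count` unique stock symbols (26 + 26*26 + 26*26*10 = 7462 available)."""
--     chars = "ABCDEFGHIJKLMNOPQRSTUVWXYZ"
--
--     def symbol(i):
--         if i < 26:
--             return chars[i]
--         if i < 702:
--             j = i - 26
--             return chars[j // 26] + chars[j % 26]
--         k = i - 702
--         return chars[k // 260] + chars[(k // 10) % 26] + chars[k % 10]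
--
--     return [symbol(i) for i in range(min(count, 7462))]
-- ===== Notes on version B (the rewrite author's own statement) =====
-- stated objective: idiomatic
-- what changed: B replaces A's materialized nested append loops with early return by a positional decoder symbol(i) computed directly via divmod arithmetic over a single range of length min(count, 7462).
-- intended difference: For -701 <= count <= -1 A's final symbols[:count] slice accidentally returns all but the last |count| of the 702 one/two-letter symbols, while B returns [], the intended result for a non-positive request. — e.g. on generate_symbols(-701): A returns ["A"], B returns []
import Mathlib
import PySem

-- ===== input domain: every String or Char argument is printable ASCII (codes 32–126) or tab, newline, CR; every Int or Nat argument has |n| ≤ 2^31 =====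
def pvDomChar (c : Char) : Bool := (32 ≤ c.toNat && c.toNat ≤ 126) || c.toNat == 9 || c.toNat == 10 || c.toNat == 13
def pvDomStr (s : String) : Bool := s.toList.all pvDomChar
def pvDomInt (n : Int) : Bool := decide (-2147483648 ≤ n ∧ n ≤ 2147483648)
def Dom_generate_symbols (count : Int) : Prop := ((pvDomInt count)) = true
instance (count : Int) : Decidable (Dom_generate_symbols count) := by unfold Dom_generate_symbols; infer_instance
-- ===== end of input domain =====

-- B replaces A's nested append loops (with an early return) by a direct positional decoding
-- symbol(i) via divmod over a single range; objective: idiomatic. B differs from A only on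
-- negative counts (see D_ below), where A's trailing slice returns an accidental value.

-- ===== PORT A =====
def pvCharsA : List Char := "ABCDEFGHIJKLMNOPQRSTUVWXYZ".toList

-- the inner 'for c3 in chars[:10]' loop with the early 'return symbols[:count]'
def pvLoopC3 (count : Int) (c1 c2 : Char) : List Char → List String → Except (List String) (List String)
  | [], symbols => .ok symbols
  | c3 :: rest, symbols =>
      let symbols' := symbols ++ [String.mk [c1, c2, c3]]
      if count ≤ PySem.List.len symbols' then
        .error (PySem.List.slice symbols' none (some count))
      else pvLoopC3 count c1 c2 rest symbols'

def pvLoopC2 (count : Int) (c1 : Char) : List Char → List String → Except (List String) (List String)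
  | [], symbols => .ok symbols
  | c2 :: rest, symbols =>
      match pvLoopC3 count c1 c2 (PySem.List.slice pvCharsA none (some 10)) symbols with
      | .error r => .error r
      | .ok symbols' => pvLoopC2 count c1 rest symbols'

def pvLoopC1 (count : Int) : List Char → List String → Except (List String) (List String)
  | [], symbols => .ok symbols
  | c1 :: rest, symbols =>
      match pvLoopC2 count c1 pvCharsA symbols with
      | .error r => .error r
      | .ok symbols' => pvLoopC1 count rest symbols'

def generate_symbols (count : Int) : List String :=
  let symbols : List String := pvCharsA.foldl (fun acc c => acc ++ [String.mk [c]]) []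
  let symbols : List String :=
    pvCharsA.foldl (fun acc c1 =>
      pvCharsA.foldl (fun acc c2 => acc ++ [String.mk [c1, c2]]) acc) symbols
  if PySem.List.len symbols < count then
    match pvLoopC1 count pvCharsA symbols with
    | .error r => r
    | .ok symbols' => PySem.List.slice symbols' none (some count)
  else
    PySem.List.slice symbols none (some count)

-- ===== PORT B =====
def pvCharsB : List Char := "ABCDEFGHIJKLMNOPQRSTUVWXYZ".toList

-- chars[i] for an in-range index, ported by hand as total list indexing (exact: B only indexes in range)
def pvSymbol (i : Int) : String :=
  if i < 26 then String.mk [PySem.List.pyGetD pvCharsB i 'A']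
  else if i < 702 then
    let j := i - 26
    String.mk [PySem.List.pyGetD pvCharsB (PySem.Int.floordiv j 26) 'A',
               PySem.List.pyGetD pvCharsB (PySem.Int.mod j 26) 'A']
  else
    let k := i - 702
    String.mk [PySem.List.pyGetD pvCharsB (PySem.Int.floordiv k 260) 'A',
               PySem.List.pyGetD pvCharsB (PySem.Int.mod (PySem.Int.floordiv k 10) 26) 'A',
               PySem.List.pyGetD pvCharsB (PySem.Int.mod k 10) 'A']

def generate_symbols_alt (count : Int) : List String :=
  (PySem.List.pyRange 0 (min count 7462) 1).map pvSymbol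

-- ===== PRECONDITION & SPEC =====
-- For -701 ≤ count ≤ -1, A's final symbols[:count] slice accidentally returns all but the
-- last |count| of the 702 one/two-letter symbols; B returns [], the intended result for a
-- non-positive request.
def D_generate_symbols (count : Int) : Prop := -701 ≤ count ∧ count ≤ -1
instance (count : Int) : Decidable (D_generate_symbols count) := by unfold D_generate_symbols; infer_instance

def Spec_generate_symbols (count : Int) (out : List String) : Prop :=
  ¬ D_generate_symbols count → out = generate_symbols_alt count
instance (count : Int) (out : List String) : Decidable (Spec_generate_symbols count out) := by unfold Spec_generate_symbols; infer_instance

def pvDiffWitness_generate_symbols : Int := -701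
def pvDiffWitnessOut_generate_symbols : (List String) × (List String) := (["A"], [])

-- ===== CLAIM (what is proved, stated in full; the proofs are below) =====
def Claim_unchanged_generate_symbols : Prop :=
  ∀ (count : Int), Dom_generate_symbols count → Spec_generate_symbols count (generate_symbols count)
def Claim_changed_generate_symbols : Prop :=
  Dom_generate_symbols (pvDiffWitness_generate_symbols) ∧
  D_generate_symbols (pvDiffWitness_generate_symbols) ∧
  generate_symbols (pvDiffWitness_generate_symbols) = pvDiffWitnessOut_generate_symbols.1 ∧
  generate_symbols_alt (pvDiffWitness_generate_symbols) = pvDiffWitnessOut_generate_symbols.2 ∧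
  pvDiffWitnessOut_generate_symbols.1 ≠ pvDiffWitnessOut_generate_symbols.2
def Claim_exact_generate_symbols : Prop :=
  ∀ (count : Int), Dom_generate_symbols count → D_generate_symbols count →
    generate_symbols count ≠ generate_symbols_alt count

-- ===== LEMMAS AND PROOFS =====

-- proof-only abbreviations
def pvSymN (k : Nat) : String := pvSymbol (k : Int)

def pvBase : List String :=
  pvCharsA.foldl (fun acc c1 =>
    pvCharsA.foldl (fun acc c2 => acc ++ [String.mk [c1, c2]]) acc)
    (pvCharsA.foldl (fun acc c => acc ++ [String.mk [c]]) [])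

def pvE : List String :=
  pvCharsA.flatMap (fun c1 =>
    pvCharsA.flatMap (fun c2 =>
      (PySem.List.slice pvCharsA none (some 10)).map (fun c3 => String.mk [c1, c2, c3])))

-- the generic "append one element; return symbols[:count] as soon as len ≥ count" loop
def pvRunE (count : Int) : List String → List String → Except (List String) (List String)
  | [], s => .ok s
  | x :: rest, s =>
      let s' := s ++ [x]
      if count ≤ PySem.List.len s' then
        .error (PySem.List.slice s' none (some count))
      else pvRunE count rest s'

theorem pvRunE_append (count : Int) (xs ys : List String) (s : List String) :
    pvRunE count (xs ++ ys) s =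
      match pvRunE count xs s with
      | .error r => .error r
      | .ok s' => pvRunE count ys s' := by
  induction xs generalizing s with
  | nil => simp [pvRunE]
  | cons x rest ih =>
      simp only [List.cons_append, pvRunE]
      split
      · rfl
      · exact ih _

theorem pvLoopC3_eq_runE (count : Int) (c1 c2 : Char) (cs : List Char) (s : List String) :
    pvLoopC3 count c1 c2 cs s = pvRunE count (cs.map (fun c3 => String.mk [c1, c2, c3])) s := by
  induction cs generalizing s with
  | nil => rfl
  | cons c rest ih =>
      simp only [List.map_cons, pvLoopC3, pvRunE]
      split
      · rfl
      · exact ih _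

theorem pvLoopC2_eq_runE (count : Int) (c1 : Char) (cs : List Char) (s : List String) :
    pvLoopC2 count c1 cs s =
      pvRunE count (cs.flatMap (fun c2 =>
        (PySem.List.slice pvCharsA none (some 10)).map (fun c3 => String.mk [c1, c2, c3]))) s := by
  induction cs generalizing s with
  | nil => rfl
  | cons c rest ih =>
      simp only [List.flatMap_cons, pvLoopC2, pvLoopC3_eq_runE, pvRunE_append]
      cases pvRunE count ((PySem.List.slice pvCharsA none (some 10)).map
          (fun c3 => String.mk [c1, c, c3])) s with
      | error r => rfl
      | ok s' => exact ih s'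

theorem pvLoopC1_eq_runE (count : Int) (cs : List Char) (s : List String) :
    pvLoopC1 count cs s =
      pvRunE count (cs.flatMap (fun c1 => pvCharsA.flatMap (fun c2 =>
        (PySem.List.slice pvCharsA none (some 10)).map (fun c3 => String.mk [c1, c2, c3])))) s := by
  induction cs generalizing s with
  | nil => rfl
  | cons c rest ih =>
      simp only [List.flatMap_cons, pvLoopC1, pvLoopC2_eq_runE, pvRunE_append]
      cases pvRunE count (pvCharsA.flatMap (fun c2 =>
          (PySem.List.slice pvCharsA none (some 10)).map (fun c3 => String.mk [c, c2, c3]))) s with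
      | error r => rfl
      | ok s' => exact ih s'

-- characterization of the generic loop
theorem pvRunE_spec (count : Int) (E : List String) :
    ∀ s : List String, (s.length : Int) < count →
      pvRunE count E s =
        if count ≤ (s.length : Int) + E.length then
          .error ((s ++ E).take count.toNat)
        else .ok (s ++ E) := by
  induction E with
  | nil =>
      intro s hs
      simp only [pvRunE, List.length_nil, List.append_nil]
      rw [if_neg (by push_cast; omega)]
  | cons x rest ih =>
      intro s hs
      simp only [pvRunE, PySem.List.len_eq, List.length_append, List.length_cons,
        List.length_nil]
      by_cases h : count ≤ (s.length : Int) + 1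
      · rw [if_pos (by push_cast; omega), if_pos (by push_cast; omega)]
        have htoNat : count.toNat = s.length + 1 := by omega
        rw [PySem.List.slice_to _ (by omega)]
        congr 1
        rw [htoNat, show s ++ x :: rest = (s ++ [x]) ++ rest by simp,
          List.take_append_of_le_length (l₁ := s ++ [x]) (by simp)]
      · rw [if_neg (by push_cast; omega)]
        rw [ih (s ++ [x]) (by simp; omega)]
        have hl : s ++ [x] ++ rest = s ++ x :: rest := by simp
        by_cases hco : count ≤ (s.length : Int) + (↑rest.length + 1)
        · rw [if_pos (by simp; omega), if_pos (by omega), hl]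
        · rw [if_neg (by simp; omega), if_neg (by omega), hl]

-- index ↔ list traversal bridges
theorem pvIdxMap {β : Type} (l : List Char) (d : Char) (f : Char → β) :
    (List.range l.length).map (fun k => f (l.getD k d)) = l.map f := by
  induction l with
  | nil => rfl
  | cons x xs ih =>
      simp only [List.length_cons, List.range_succ_eq_map, List.map_cons, List.map_map,
        Function.comp_def, List.getD_cons_succ, List.getD_cons_zero]
      rw [ih]

theorem pvIdxFlatMap {β : Type} (l : List Char) (d : Char) (f : Char → List β) :
    (List.range l.length).flatMap (fun k => f (l.getD k d)) = l.flatMap f := by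
  induction l with
  | nil => rfl
  | cons x xs ih =>
      simp only [List.length_cons, List.range_succ_eq_map, List.flatMap_cons, List.flatMap_map,
        List.getD_cons_succ, List.getD_cons_zero]
      rw [ih]

theorem pvIdxMap' {β : Type} (l : List Char) (n : Nat) (hn : l.length = n) (d : Char)
    (f : Char → β) : (List.range n).map (fun k => f (l.getD k d)) = l.map f := by
  subst hn; exact pvIdxMap l d f

theorem pvIdxFlatMap' {β : Type} (l : List Char) (n : Nat) (hn : l.length = n) (d : Char)
    (f : Char → List β) : (List.range n).flatMap (fun k => f (l.getD k d)) = l.flatMap f := by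
  subst hn; exact pvIdxFlatMap l d f

theorem pvRangeMul {β : Type} (m n : Nat) (f : Nat → β) :
    (List.range (m * n)).map f =
      (List.range m).flatMap (fun i => (List.range n).map (fun j => f (n * i + j))) := by
  induction m with
  | zero => simp
  | succ m ih =>
      rw [List.range_succ, List.flatMap_append, ← ih,
        show (m + 1) * n = m * n + n from by ring, List.range_add, List.map_append]
      simp [List.map_map, Function.comp_def, Nat.mul_comm]

-- values of B's decoder at the three kinds of positions
theorem pvSym1 (k : Nat) (hk : k < 26) : pvSymN k = String.mk [pvCharsA.getD k 'A'] := by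
  have hk' : (k : Int) < 26 := by exact_mod_cast hk
  simp [pvSymN, pvSymbol, hk', pvCharsB, pvCharsA]

theorem pvSym2 (a b : Nat) (ha : a < 26) (hb : b < 26) :
    pvSymN (26 + (26 * a + b)) = String.mk [pvCharsA.getD a 'A', pvCharsA.getD b 'A'] := by
  have h1 : ¬ ((26 + (26 * a + b) : Nat) : Int) < 26 := by push_cast; omega
  have h2 : ((26 + (26 * a + b) : Nat) : Int) < 702 := by push_cast; omega
  simp only [pvSymN, pvSymbol, h1, h2, if_false, if_true]
  have e0 : ((26 + (26 * a + b) : Nat) : Int) - 26 = ((26 * a + b : Nat) : Int) := by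
    push_cast; omega
  rw [e0, show (26 : Int) = ((26 : Nat) : Int) from rfl, PySem.Int.floordiv_natCast,
    PySem.Int.mod_natCast]
  rw [show (26 * a + b) / 26 = a from by omega, show (26 * a + b) % 26 = b from by omega]
  simp [pvCharsB, pvCharsA]

theorem pvSym3 (a b c : Nat) (ha : a < 26) (hb : b < 26) (hc : c < 10) :
    pvSymN (702 + (260 * a + (10 * b + c)))
      = String.mk [pvCharsA.getD a 'A', pvCharsA.getD b 'A', pvCharsA.getD c 'A'] := by
  have h1 : ¬ ((702 + (260 * a + (10 * b + c)) : Nat) : Int) < 26 := by push_cast; omega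
  have h2 : ¬ ((702 + (260 * a + (10 * b + c)) : Nat) : Int) < 702 := by push_cast; omega
  simp only [pvSymN, pvSymbol, h1, h2, if_false]
  have e0 : ((702 + (260 * a + (10 * b + c)) : Nat) : Int) - 702
      = ((260 * a + (10 * b + c) : Nat) : Int) := by push_cast; omega
  rw [e0, show (260 : Int) = ((260 : Nat) : Int) from rfl,
    show (10 : Int) = ((10 : Nat) : Int) from rfl,
    show (26 : Int) = ((26 : Nat) : Int) from rfl,
    PySem.Int.floordiv_natCast, PySem.Int.floordiv_natCast, PySem.Int.mod_natCast,
    PySem.Int.mod_natCast]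
  rw [show (260 * a + (10 * b + c)) / 260 = a from by omega,
    show (260 * a + (10 * b + c)) / 10 % 26 = b from by omega,
    show (260 * a + (10 * b + c)) % 10 = c from by omega]
  simp [pvCharsB, pvCharsA]

-- A's first 702 symbols are B's decoder on 0..701
theorem pvBase_eq : pvBase = (List.range 702).map pvSymN := by
  unfold pvBase
  simp only [PySem.List.foldl_append_singleton_eq_map, PySem.List.foldl_append_eq_flatMap,
    List.nil_append]
  rw [show (702 : Nat) = 26 + 26 * 26 from by norm_num, List.range_add, List.map_append,
    List.map_map, pvRangeMul]
  have h1 : List.map pvSymN (List.range 26) = List.map (fun x => String.mk [x]) pvCharsA := by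
    rw [← pvIdxMap' pvCharsA 26 (by simp [pvCharsA]) 'A' (fun c => String.mk [c])]
    apply List.map_congr_left
    intro k hk
    simp only [List.mem_range] at hk
    exact pvSym1 k hk
  have h2 : (List.range 26).flatMap
        (fun i => List.map (fun j => (pvSymN ∘ fun x => 26 + x) (26 * i + j)) (List.range 26))
      = pvCharsA.flatMap (fun c1 => pvCharsA.map (fun c2 => String.mk [c1, c2])) := by
    rw [← pvIdxFlatMap' pvCharsA 26 (by simp [pvCharsA]) 'A'
      (fun c1 => pvCharsA.map (fun c2 => String.mk [c1, c2]))]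
    apply List.flatMap_congr
    intro a ha
    simp only [List.mem_range] at ha
    rw [← pvIdxMap' pvCharsA 26 (by simp [pvCharsA]) 'A'
      (fun c2 => String.mk [pvCharsA.getD a 'A', c2])]
    apply List.map_congr_left
    intro b hb
    simp only [List.mem_range] at hb
    simpa [Function.comp_def] using pvSym2 a b ha hb
  rw [h1, h2]

-- A's three-letter block is B's decoder on 702..7461
theorem pvE_eq : pvE = (List.range 6760).map (fun k => pvSymN (702 + k)) := by
  unfold pvE
  rw [show (6760 : Nat) = 26 * 260 from by norm_num, pvRangeMul]
  rw [← pvIdxFlatMap' pvCharsA 26 (by simp [pvCharsA]) 'A'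
    (fun c1 => pvCharsA.flatMap (fun c2 =>
      (PySem.List.slice pvCharsA none (some 10)).map (fun c3 => String.mk [c1, c2, c3])))]
  apply List.flatMap_congr
  intro a ha
  simp only [List.mem_range] at ha
  rw [show (260 : Nat) = 26 * 10 from by norm_num, pvRangeMul]
  rw [← pvIdxFlatMap' pvCharsA 26 (by simp [pvCharsA]) 'A'
    (fun c2 => (PySem.List.slice pvCharsA none (some 10)).map
      (fun c3 => String.mk [pvCharsA.getD a 'A', c2, c3]))]
  apply List.flatMap_congr
  intro b hb
  simp only [List.mem_range] at hb
  rw [show PySem.List.slice pvCharsA none (some 10) = pvCharsA.take 10 from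
    PySem.List.slice_to pvCharsA (by norm_num)]
  rw [← pvIdxMap' (pvCharsA.take 10) 10 (by simp [pvCharsA]) 'A'
    (fun c3 => String.mk [pvCharsA.getD a 'A', pvCharsA.getD b 'A', c3])]
  apply List.map_congr_left
  intro c hc
  simp only [List.mem_range] at hc
  have hget : (pvCharsA.take 10).getD c 'A' = pvCharsA.getD c 'A' := by
    interval_cases c <;> rfl
  rw [hget, show 26 * 10 * a + (10 * b + c) = 260 * a + (10 * b + c) from by ring]
  exact (pvSym3 a b c ha hb hc).symm

theorem pvBase_len : pvBase.length = 702 := by rw [pvBase_eq]; simp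

theorem pvE_len : pvE.length = 6760 := by rw [pvE_eq]; simp

theorem pvFull_eq : pvBase ++ pvE = (List.range 7462).map pvSymN := by
  rw [show (7462 : Nat) = 702 + 6760 from by norm_num, List.range_add, List.map_append,
    pvBase_eq, pvE_eq, List.map_map]
  rfl

theorem pvTake_full (m : Nat) (hm : m ≤ 7462) :
    (pvBase ++ pvE).take m = (List.range m).map pvSymN := by
  rw [pvFull_eq, ← List.map_take, List.take_range, Nat.min_eq_left hm]

theorem pvTake_base (m : Nat) (hm : m ≤ 702) :
    pvBase.take m = (List.range m).map pvSymN := by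
  rw [pvBase_eq, ← List.map_take, List.take_range, Nat.min_eq_left hm]

theorem pvRangeMap (n : Int) :
    (PySem.List.pyRange 0 n 1).map pvSymbol = (List.range n.toNat).map pvSymN := by
  rw [PySem.List.pyRange_one, List.map_map]
  simp only [Int.sub_zero]
  apply List.map_congr_left
  intro k _
  simp [pvSymN]

theorem pvA_small (count : Int) (h : ¬ 702 < count) :
    generate_symbols count = PySem.List.slice pvBase none (some count) := by
  show (if PySem.List.len pvBase < count then
          match pvLoopC1 count pvCharsA pvBase with
          | .error r => r
          | .ok symbols' => PySem.List.slice symbols' none (some count)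
        else PySem.List.slice pvBase none (some count)) = PySem.List.slice pvBase none (some count)
  rw [PySem.List.len_eq, pvBase_len, if_neg (by omega)]

theorem pvA_big (count : Int) (h : 702 < count) :
    generate_symbols count =
      match pvLoopC1 count pvCharsA pvBase with
      | .error r => r
      | .ok symbols' => PySem.List.slice symbols' none (some count) := by
  show (if PySem.List.len pvBase < count then
          match pvLoopC1 count pvCharsA pvBase with
          | .error r => r
          | .ok symbols' => PySem.List.slice symbols' none (some count)
        else PySem.List.slice pvBase none (some count)) = _
  rw [PySem.List.len_eq, pvBase_len, if_pos (by omega)]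

-- ===== VERDICT (by name: the statement is the Claim_ definition above) =====
theorem generate_symbols_spec : Claim_unchanged_generate_symbols := by
  intro count _ hD
  unfold generate_symbols_alt
  rw [pvRangeMap]
  simp only [D_generate_symbols, not_and, not_le] at hD
  by_cases h702 : count ≤ 702
  · rw [pvA_small count (by omega)]
    by_cases hneg : 0 ≤ count
    · have hmin : min count 7462 = count := min_eq_left (by omega)
      rw [hmin, PySem.List.slice_to _ hneg, pvTake_base count.toNat (by omega)]
    · -- count < 0 and ¬D, so count ≤ -702: both sides empty
      have hc : count ≤ -702 := by
        by_contra hcon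
        omega
      have hk0 : 0 < (-count).toNat := by omega
      have hcform : count = -(((-count).toNat : Nat) : Int) := by omega
      rw [hcform, PySem.List.slice_to_neg_natCast pvBase _ hk0]
      rw [pvBase_len, show 702 - (-count).toNat = 0 from by omega, List.take_zero]
      rw [show (min (-(((-count).toNat : Nat) : Int)) 7462).toNat = 0 from by omega]
      rfl
  · rw [pvA_big count (by omega), pvLoopC1_eq_runE]
    rw [show pvCharsA.flatMap (fun c1 => pvCharsA.flatMap (fun c2 =>
      (PySem.List.slice pvCharsA none (some 10)).map
        (fun c3 => String.mk [c1, c2, c3]))) = pvE from rfl]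
    rw [pvRunE_spec count pvE pvBase (by rw [pvBase_len]; omega)]
    rw [pvBase_len, pvE_len]
    by_cases hbig : count ≤ 7462
    · rw [if_pos (by omega)]
      have hmin : min count 7462 = count := min_eq_left hbig
      rw [hmin, pvTake_full count.toNat (by omega)]
    · rw [if_neg (by omega)]
      have hmin : min count 7462 = 7462 := min_eq_right (by omega)
      rw [hmin, show ((7462 : Int)).toNat = 7462 from rfl, ← pvFull_eq]
      show PySem.List.slice (pvBase ++ pvE) none (some count) = pvBase ++ pvE
      rw [PySem.List.slice_to _ (by omega), List.take_of_length_le (by simp [pvBase_len, pvE_len]; omega)]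

theorem generate_symbols_changed : Claim_changed_generate_symbols := by
  unfold Claim_changed_generate_symbols
  refine ⟨by decide, by decide, ?_, ?_, by decide⟩
  · show generate_symbols (-701) = ["A"]
    rw [pvA_small (-701) (by omega)]
    have h701 : (-701 : Int) = -((701 : Nat) : Int) := by norm_num
    rw [h701, PySem.List.slice_to_neg_natCast pvBase 701 (by norm_num), pvBase_len,
      show 702 - 701 = 1 from rfl, pvBase_eq, ← List.map_take, List.take_range]
    decide
  · show generate_symbols_alt (-701) = []
    unfold generate_symbols_alt
    rw [pvRangeMap]
    rfl

theorem generate_symbols_tight : Claim_exact_generate_symbols := by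
  intro count _ hD
  unfold D_generate_symbols at hD
  unfold generate_symbols_alt
  rw [pvRangeMap, show min count 7462 = count from min_eq_left (by omega),
    show count.toNat = 0 from by omega, pvA_small count (by omega)]
  have hk0 : 0 < (-count).toNat := by omega
  have hcform : count = -(((-count).toNat : Nat) : Int) := by omega
  rw [hcform, PySem.List.slice_to_neg_natCast pvBase _ hk0, pvBase_len]
  intro hcontra
  have := congrArg List.length hcontra
  simp only [List.length_take, pvBase_len, List.range_zero, List.map_nil,
    List.length_nil] at this
  omega
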